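-- pv_equiv track=rewrite | github.com/sunilsoni/interview-notes-python | com/interview/2025/feb/visa/test1/diagonal.py | solution
-- ===== SOURCE A (Python) =====
-- def solution(matrix):
--     """
--     Finds the longest diagonal segment matching the repeating pattern:
--       1, 2, 0, 2, 0, 2, 0, ...
--     The segment must end on the matrix border.
--     """
--     n = len(matrix)
--     m = len(matrix[0]) if n else 0
--
--     if n == 0 or m == 0:
--         return 0
--
--     def pattern_value(index):
--         """Value at position 'index' in the sequence 1,2,0,2,0,2,0,..."""
--         # index=0 -> 1
--         # index=1 -> 2
--         # index=2 -> 0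
--         # index=3 -> 2
--         # index=4 -> 0, ...
--         return 1 if index == 0 else (2 if (index % 2 == 1) else 0)
--
--     def on_border(r, c):
--         """Check if (r,c) is on the outer border of the matrix."""
--         return (r == 0 or r == n - 1 or c == 0 or c == m - 1)
--
--     directions = [(1, 1), (1, -1), (-1, 1), (-1, -1)]
--     max_length = 0
--
--     for r in range(n):
--         for c in range(m):
--             # Only start if we have a '1' at this cell
--             if matrix[r][c] == 1:
--                 for (dr, dc) in directions:
--                     rr, cc = r, c
--                     pattern_index = 0
--
--                     # Move along the diagonal while cells match the pattern
--                     while 0 <= rr < n and 0 <= cc < m \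
--                             and matrix[rr][cc] == pattern_value(pattern_index):
--                         pattern_index += 1
--                         rr += dr
--                         cc += dc
--
--                     # Last valid cell is one step back
--                     last_r = rr - dr
--                     last_c = cc - dc
--                     current_length = pattern_index
--
--                     # Check if that last valid cell is on the border
--                     if 0 <= last_r < n and 0 <= last_c < m:
--                         if on_border(last_r, last_c):
--                             max_length = max(max_length, current_length)
--
--     return max_length
-- ===== SOURCE B (Python) =====
-- def solution(matrix):
--     """
--     Longest diagonal segment matching the pattern 1,2,0,2,0,... that ends on
--     the matrix border.  Dynamic programming: for each of the four diagonal
--     directions, precompute the length of the maximal alternating 2,0,2,0,...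
--     chain starting at every cell; each start cell then reads one table entry
--     instead of re-walking its diagonal.
--     """
--     n = len(matrix)
--     m = len(matrix[0]) if n else 0
--     if n == 0 or m == 0:
--         return 0
--     rows = [row[:m] for row in matrix]
--
--     def core(rs):
--         # For direction (+1,+1): f[r][c] = length of the maximal chain
--         # 2,0,2,0,... starting at (r,c) and moving down-right.
--         fs = []
--         fN, gN = [0] * m, [0] * m
--         for row in reversed(rs):
--             f = [(1 + (gN[c + 1] if c + 1 < m else 0)) if v == 2 else 0
--                  for c, v in enumerate(row)]
--             g = [(1 + (fN[c + 1] if c + 1 < m else 0)) if v == 0 else 0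
--                  for c, v in enumerate(row)]
--             fs.append(f)
--             fN, gN = f, g
--         fs.reverse()
--         return fs
--
--     flipped_rows = rows[::-1]
--     tables = {
--         (1, 1): core(rows),
--         (1, -1): core([row[::-1] for row in rows]),
--         (-1, 1): core(flipped_rows),
--         (-1, -1): core([row[::-1] for row in flipped_rows]),
--     }
--
--     best = 0
--     for r in range(n):
--         for c in range(m):
--             if rows[r][c] != 1:
--                 continue
--             for (dr, dc), tab in tables.items():
--                 rr = r if dr == 1 else n - 1 - r
--                 cc = c if dc == 1 else m - 1 - c
--                 L = 1 + (tab[rr + 1][cc + 1] if rr + 1 < n and cc + 1 < m else 0)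
--                 er, ec = r + (L - 1) * dr, c + (L - 1) * dc
--                 if er == 0 or er == n - 1 or ec == 0 or ec == m - 1:
--                     best = max(best, L)
--     return best
-- ===== Notes on version B (the rewrite author's own statement) =====
-- stated objective: alternative
-- what changed: A walks each diagonal from every start cell, re-scanning the alternating 2/0 run per start and direction; B precomputes, for each of the four diagonal directions, dynamic-programming tables of alternating 2/0 chain lengths (two mutually recursive states per cell) and answers each start cell from one table entry.
import Mathlib
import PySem

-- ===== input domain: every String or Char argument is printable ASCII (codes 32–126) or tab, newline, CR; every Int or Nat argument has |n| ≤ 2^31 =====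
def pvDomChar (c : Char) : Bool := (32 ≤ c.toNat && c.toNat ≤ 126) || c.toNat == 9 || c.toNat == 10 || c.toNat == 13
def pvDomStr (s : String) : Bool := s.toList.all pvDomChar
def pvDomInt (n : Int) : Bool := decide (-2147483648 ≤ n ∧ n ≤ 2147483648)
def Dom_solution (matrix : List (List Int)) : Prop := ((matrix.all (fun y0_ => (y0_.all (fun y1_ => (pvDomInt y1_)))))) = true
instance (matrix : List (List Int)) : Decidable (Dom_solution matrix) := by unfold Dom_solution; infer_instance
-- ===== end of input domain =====

-- B replaces A's per-start diagonal walk by four precomputed dynamic-programming tables of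
-- alternating 2/0 chain lengths (a different algorithm: each start cell reads one table entry
-- instead of re-walking its diagonal); return values proved equal under Pre_.

-- ===== PORT A =====

-- pattern_value(index): 1, 2, 0, 2, 0, ...
def pvPatternValue (i : Nat) : Int := if i = 0 then 1 else if i % 2 = 1 then 2 else 0

-- matrix[r][c]; in A only evaluated under the checks 0 ≤ r < n and 0 ≤ c < m of the
-- while condition (exact there on Pre_'s domain, where every row has length ≥ m)
def pvVal (M : List (List Int)) (r c : Int) : Int := (M.getD r.toNat []).getD c.toNat 0

-- the while loop: state (rr, cc, pattern_index); fuel n+1 is an upper bound on the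
-- iteration count (rr takes pairwise distinct values in [0, n) while looping), so the
-- fuelled recursion performs exactly the iterations the Python while loop performs
def pvLoopA (M : List (List Int)) (n m : Int) (dr dc : Int) :
    Int → Int → Nat → Nat → Int × Int × Nat
  | rr, cc, pi, 0 => (rr, cc, pi)
  | rr, cc, pi, fuel + 1 =>
    if 0 ≤ rr ∧ rr < n ∧ 0 ≤ cc ∧ cc < m ∧ pvVal M rr cc = pvPatternValue pi then
      pvLoopA M n m dr dc (rr + dr) (cc + dc) (pi + 1) fuel
    else (rr, cc, pi)

def solution (matrix : List (List Int)) : Int :=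
  let n : Int := matrix.length
  let m : Int := (matrix.headD []).length   -- len(matrix[0]) if n else 0
  if n = 0 ∨ m = 0 then 0
  else
    (List.range matrix.length).foldl (fun acc (r : Nat) =>
      (List.range (matrix.headD []).length).foldl (fun acc (c : Nat) =>
        if pvVal matrix (r : Int) (c : Int) = 1 then
          [((1 : Int), (1 : Int)), (1, -1), (-1, 1), (-1, -1)].foldl (fun acc d =>
            let t := pvLoopA matrix n m d.1 d.2 (r : Int) (c : Int) 0 (matrix.length + 1)
            let lastR := t.1 - d.1
            let lastC := t.2.1 - d.2
            if 0 ≤ lastR ∧ lastR < n ∧ 0 ≤ lastC ∧ lastC < m then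
              if lastR = 0 ∨ lastR = n - 1 ∨ lastC = 0 ∨ lastC = m - 1 then
                max acc (t.2.2 : Int)
              else acc
            else acc) acc
        else acc) acc) 0

-- ===== PORT B =====

-- one comprehension of core: next-cell lookup 'nxt[c+1] if c+1 < m else 0'
def pvMkRow (m : Nat) (row : List Int) (nxt : List Int) (v : Int) : List Int :=
  row.mapIdx (fun c x =>
    if x = v then 1 + (if c + 1 < m then nxt.getD (c + 1) 0 else 0) else 0)

-- core(rs): python appends per-row f-lists while scanning reversed(rs) and reverses at
-- the end; consing while scanning reversed(rs) builds the same final list directly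
def pvCore (m : Nat) (rs : List (List Int)) : List (List Int) :=
  (rs.reverse.foldl
    (fun (st : List (List Int) × List Int × List Int) row =>
      let f := pvMkRow m row st.2.2 2
      let g := pvMkRow m row st.2.1 0
      (f :: st.1, f, g))
    ([], List.replicate m 0, List.replicate m 0)).1

def solution_alt (matrix : List (List Int)) : Int :=
  let n := matrix.length
  let m := (matrix.headD []).length
  if n = 0 ∨ m = 0 then 0
  else
    let rows := matrix.map (fun row => row.take m)
    let tables : List ((Int × Int) × List (List Int)) :=
      [((1, 1), pvCore m rows),
       ((1, -1), pvCore m (rows.map List.reverse)),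
       ((-1, 1), pvCore m rows.reverse),
       ((-1, -1), pvCore m (rows.reverse.map List.reverse))]
    (List.range n).foldl (fun best r =>
      (List.range m).foldl (fun best c =>
        if (rows.getD r []).getD c 0 ≠ 1 then best
        else
          tables.foldl (fun best dt =>
            let dr := dt.1.1
            let dc := dt.1.2
            let rr : Nat := if dr = 1 then r else n - 1 - r
            let cc : Nat := if dc = 1 then c else m - 1 - c
            let L : Int := 1 +
              (if rr + 1 < n ∧ cc + 1 < m then ((dt.2.getD (rr + 1) []).getD (cc + 1) 0) else 0)
            let er := (r : Int) + (L - 1) * dr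
            let ec := (c : Int) + (L - 1) * dc
            if er = 0 ∨ er = (n : Int) - 1 ∨ ec = 0 ∨ ec = (m : Int) - 1 then
              max best L
            else best) best) best) 0

-- ===== PRECONDITION & SPEC =====

-- Pre_ excludes exactly the ragged matrices on which A raises IndexError: a row shorter
-- than row 0 is indexed at a column < len(matrix[0]) by A's scan
def Pre_solution (matrix : List (List Int)) : Prop :=
  ∀ row ∈ matrix, (matrix.headD []).length ≤ row.length

instance (matrix : List (List Int)) : Decidable (Pre_solution matrix) := by
  unfold Pre_solution; infer_instance

def pvWitness_solution : List (List Int) := [[1, 2], [2, 0]]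

def Spec_solution (matrix : List (List Int)) (out : Int) : Prop := out = solution_alt matrix
instance (matrix : List (List Int)) (out : Int) : Decidable (Spec_solution matrix out) := by
  unfold Spec_solution; infer_instance

-- ===== CLAIM (what is proved, stated in full; the proofs are below) =====
def Claim_equal_solution : Prop :=
  ∀ (matrix : List (List Int)), Dom_solution matrix → Pre_solution matrix →
    Spec_solution matrix (solution matrix)

-- ===== LEMMAS AND PROOFS =====

-- specification of the chain lengths: runF m rs c = maximal run 2,0,2,0,… starting at
-- row rs.head, column c, moving down-right; runG the same expecting 0,2,0,…
mutual
def runF (m : Nat) : List (List Int) → Int → Nat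
  | [], _ => 0
  | row :: rest, c =>
    if 0 ≤ c ∧ c < (m : Int) ∧ row.getD c.toNat 0 = 2 then 1 + runG m rest (c + 1) else 0
def runG (m : Nat) : List (List Int) → Int → Nat
  | [], _ => 0
  | row :: rest, c =>
    if 0 ≤ c ∧ c < (m : Int) ∧ row.getD c.toNat 0 = 0 then 1 + runF m rest (c + 1) else 0
end


-- runF/runG vanish past the right edge
lemma runF_ge (m : Nat) (rs : List (List Int)) (c : Int) (h : (m : Int) ≤ c) :
    runF m rs c = 0 := by
  cases rs with
  | nil => rfl
  | cons row rest => rw [runF]; rw [if_neg (by omega)]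

lemma runG_ge (m : Nat) (rs : List (List Int)) (c : Int) (h : (m : Int) ≤ c) :
    runG m rs c = 0 := by
  cases rs with
  | nil => rfl
  | cons row rest => rw [runG]; rw [if_neg (by omega)]

-- getD through take: equal below the truncation width
lemma take_getD (row : List Int) (m c : Nat) (h : c < m) :
    (row.take m).getD c 0 = row.getD c 0 := by
  simp [List.getD_eq_getElem?_getD, h]

lemma getD_out (l : List Int) (c : Nat) (h : l.length ≤ c) : l.getD c 0 = 0 := by
  simp [List.getD_eq_getElem?_getD, List.getElem?_eq_none (by omega)]

lemma getD_map (l : List (List Int)) (f : List Int → List Int) (i : Nat)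
    (h : i < l.length) : (l.map f).getD i [] = f (l.getD i []) := by
  simp [List.getD_eq_getElem?_getD, List.getElem?_map, List.getElem?_eq_getElem h]

-- pvVal congruences
lemma val_map_take (M : List (List Int)) (m' : Nat) (rr cc : Int)
    (h1 : 0 ≤ rr) (h2 : rr < (M.length : Int)) (h3 : 0 ≤ cc) (h4 : cc < (m' : Int)) :
    pvVal (M.map (fun row => row.take m')) rr cc = pvVal M rr cc := by
  unfold pvVal
  rw [getD_map _ _ _ (by omega)]
  exact take_getD _ _ _ (by omega)

lemma rev_row_getD (row : List Int) (m' c : Nat) (hlen : row.length = m') (h : c < m') :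
    row.reverse.getD (m' - 1 - c) 0 = row.getD c 0 := by
  simp only [List.getD_eq_getElem?_getD]
  rw [List.getElem?_reverse (by omega), show row.length - 1 - (m' - 1 - c) = c by omega]

lemma val_reverse (M : List (List Int)) (n : Int) (hn : n = (M.length : Int)) (rr cc : Int)
    (h1 : 0 ≤ rr) (h2 : rr < n) :
    pvVal M.reverse (n - 1 - rr) cc = pvVal M rr cc := by
  subst hn
  unfold pvVal
  congr 1
  rw [show ((M.length : Int) - 1 - rr).toNat = M.length - 1 - rr.toNat by omega]
  simp only [List.getD_eq_getElem?_getD]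
  rw [List.getElem?_reverse (by omega),
    show M.length - 1 - (M.length - 1 - rr.toNat) = rr.toNat by omega]

lemma val_map_reverse (M : List (List Int)) (m' : Nat) (m : Int) (hm : m = (m' : Int))
    (hrow : ∀ row ∈ M, row.length = m') (rr cc : Int)
    (h1 : 0 ≤ rr) (h2 : rr < (M.length : Int)) (h3 : 0 ≤ cc) (h4 : cc < m) :
    pvVal (M.map List.reverse) rr (m - 1 - cc) = pvVal M rr cc := by
  subst hm
  unfold pvVal
  rw [getD_map _ _ _ (by omega)]
  have hlen : (M.getD rr.toNat []).length = m' := by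
    have hg : M.getD rr.toNat [] = M[rr.toNat]'(by omega) := by
      simp [List.getD_eq_getElem?_getD, List.getElem?_eq_getElem (by omega : rr.toNat < M.length)]
    rw [hg]
    exact hrow _ (List.getElem_mem _)
  rw [show ((m' : Int) - 1 - cc).toNat = m' - 1 - cc.toNat by omega]
  exact rev_row_getD _ m' cc.toNat hlen (by omega)

-- the loop on the truncated matrix equals the loop on the original matrix
lemma loop_rows (M : List (List Int)) (m' : Nat) (dr dc : Int) :
    ∀ (fuel : Nat) (rr cc : Int) (pi : Nat),
      pvLoopA (M.map (fun row => row.take m')) (M.length) (m') dr dc rr cc pi fuel =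
      pvLoopA M (M.length) (m') dr dc rr cc pi fuel := by
  intro fuel
  induction fuel with
  | zero => intro rr cc pi; rfl
  | succ fuel ih =>
    intro rr cc pi
    rw [pvLoopA, pvLoopA]
    by_cases hb : 0 ≤ rr ∧ rr < ((M.length : Int)) ∧ 0 ≤ cc ∧ cc < ((m' : Int)) ∧
        pvVal M rr cc = pvPatternValue pi
    · rw [if_pos (by
        refine ⟨hb.1, hb.2.1, hb.2.2.1, hb.2.2.2.1, ?_⟩
        rw [val_map_take M m' rr cc hb.1 hb.2.1 hb.2.2.1 hb.2.2.2.1]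
        exact hb.2.2.2.2), if_pos hb]
      exact ih _ _ _
    · rw [if_neg (by
        intro hc
        exact hb ⟨hc.1, hc.2.1, hc.2.2.1, hc.2.2.2.1, by
          rw [← val_map_take M m' rr cc hc.1 hc.2.1 hc.2.2.1 hc.2.2.2.1]
          exact hc.2.2.2.2⟩), if_neg hb]

-- row flip: running the loop with row direction -dr on the reversed matrix
lemma loop_flipR (M : List (List Int)) (n m : Int) (hn : n = (M.length : Int)) (dr dc : Int) :
    ∀ (fuel : Nat) (rr cc : Int) (pi : Nat),
      (pvLoopA M.reverse n m (-dr) dc (n - 1 - rr) cc pi fuel).2.2 =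
      (pvLoopA M n m dr dc rr cc pi fuel).2.2 := by
  intro fuel
  induction fuel with
  | zero => intro rr cc pi; rfl
  | succ fuel ih =>
    intro rr cc pi
    rw [pvLoopA, pvLoopA]
    by_cases hb : 0 ≤ rr ∧ rr < n ∧ 0 ≤ cc ∧ cc < m ∧
        pvVal M rr cc = pvPatternValue pi
    · rw [if_pos (by
        refine ⟨by omega, by omega, hb.2.2.1, hb.2.2.2.1, ?_⟩
        rw [val_reverse M n hn rr cc hb.1 hb.2.1]; exact hb.2.2.2.2),
        if_pos hb]
      rw [show n - 1 - rr + -dr = n - 1 - (rr + dr) by ring]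
      exact ih _ _ _
    · rw [if_neg (fun hc => hb ⟨by omega, by omega, hc.2.2.1, hc.2.2.2.1, by
          rw [← val_reverse M n hn rr cc (by omega) (by omega)]; exact hc.2.2.2.2⟩),
        if_neg hb]

-- column flip (matrix rectangular of width m'): column direction -dc on column-reversed rows
lemma loop_flipC (M : List (List Int)) (n m : Int) (m' : Nat) (hm : m = (m' : Int))
    (hrow : ∀ row ∈ M, row.length = m') (hnle : n ≤ (M.length : Int)) (dr dc : Int) :
    ∀ (fuel : Nat) (rr cc : Int) (pi : Nat),
      (pvLoopA (M.map List.reverse) n m dr (-dc) rr (m - 1 - cc) pi fuel).2.2 =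
      (pvLoopA M n m dr dc rr cc pi fuel).2.2 := by
  intro fuel
  induction fuel with
  | zero => intro rr cc pi; rfl
  | succ fuel ih =>
    intro rr cc pi
    rw [pvLoopA, pvLoopA]
    by_cases hb : 0 ≤ rr ∧ rr < n ∧ 0 ≤ cc ∧ cc < m ∧
        pvVal M rr cc = pvPatternValue pi
    · rw [if_pos (by
        refine ⟨hb.1, hb.2.1, by omega, by omega, ?_⟩
        rw [val_map_reverse M m' m hm hrow rr cc hb.1 (by omega) hb.2.2.1 hb.2.2.2.1]
        exact hb.2.2.2.2), if_pos hb]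
      rw [show m - 1 - cc + -dc = m - 1 - (cc + dc) by ring]
      exact ih _ _ _
    · rw [if_neg (fun hc => hb ⟨hc.1, hc.2.1, by omega, by omega, by
          rw [← val_map_reverse M m' m hm hrow rr cc hc.1 (by omega) (by omega) (by omega)]
          exact hc.2.2.2.2⟩), if_neg hb]

-- shape of the loop result: k matched steps from the start, last matched cell in bounds
lemma loop_shape (M : List (List Int)) (n m dr dc : Int) :
    ∀ (fuel : Nat) (rr cc : Int) (pi : Nat), ∃ k : Nat,
      pvLoopA M n m dr dc rr cc pi fuel = (rr + k * dr, cc + k * dc, pi + k) ∧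
      (0 < k → 0 ≤ rr + (k - 1 : Int) * dr ∧ rr + (k - 1 : Int) * dr < n ∧
               0 ≤ cc + (k - 1 : Int) * dc ∧ cc + (k - 1 : Int) * dc < m) := by
  intro fuel
  induction fuel with
  | zero =>
    intro rr cc pi
    exact ⟨0, by simp [pvLoopA], fun h => absurd h (by omega)⟩
  | succ fuel ih =>
    intro rr cc pi
    rw [pvLoopA]
    by_cases hb : 0 ≤ rr ∧ rr < n ∧ 0 ≤ cc ∧ cc < m ∧ pvVal M rr cc = pvPatternValue pi
    · rw [if_pos hb]
      obtain ⟨k, hk, hlast⟩ := ih (rr + dr) (cc + dc) (pi + 1)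
      refine ⟨k + 1, ?_, ?_⟩
      · rw [hk, Prod.mk.injEq, Prod.mk.injEq]
        refine ⟨by push_cast; ring, by push_cast; ring, by omega⟩
      · intro _
        rcases Nat.eq_zero_or_pos k with hk0 | hk0
        · subst hk0
          rw [show ((0 + 1 : Nat) : Int) - 1 = 0 by norm_num]
          rw [show rr + 0 * dr = rr by ring, show cc + 0 * dc = cc by ring]
          exact ⟨hb.1, hb.2.1, hb.2.2.1, hb.2.2.2.1⟩
        · have h := hlast hk0
          rw [show rr + (((k + 1 : Nat) : Int) - 1) * dr = rr + dr + ((k : Int) - 1) * dr by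
                push_cast; ring,
              show cc + (((k + 1 : Nat) : Int) - 1) * dc = cc + dc + ((k : Int) - 1) * dc by
                push_cast; ring]
          exact h
    · rw [if_neg hb]
      exact ⟨0, by simp, fun h => absurd h (by omega)⟩

-- the loop along direction (1,1), from pattern index pi ≥ 1, is pi + an alternating run
lemma loop_run (M : List (List Int)) (m' : Nat) (n : Int) (hn : n = (M.length : Int)) :
    ∀ (rest : List (List Int)) (rr : Nat) (cc : Int) (pi fuel : Nat),
      rest = M.drop rr → rest.length < fuel → 1 ≤ pi →
      (pvLoopA M n (m') 1 1 (rr : Int) cc pi fuel).2.2 =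
        pi + (if pi % 2 = 1 then runF m' rest cc else runG m' rest cc) := by
  intro rest
  induction rest with
  | nil =>
    intro rr cc pi fuel hdrop hfuel hpi
    have hrr : M.length ≤ rr := by
      by_contra h
      have hl : (M.drop rr).length = M.length - rr := List.length_drop ..
      rw [← hdrop] at hl; simp at hl; omega
    obtain ⟨fuel', rfl⟩ : ∃ f, fuel = f + 1 := ⟨fuel - 1, by omega⟩
    rw [pvLoopA, if_neg (by omega)]
    rw [runF, runG]; split <;> rfl
  | cons row rest' ih =>
    intro rr cc pi fuel hdrop hfuel hpi
    obtain ⟨fuel', rfl⟩ : ∃ f, fuel = f + 1 := ⟨fuel - 1, by omega⟩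
    have hrr : rr < M.length := by
      by_contra h
      rw [List.drop_eq_nil_of_le (by omega)] at hdrop
      exact absurd hdrop (by simp)
    have hrow : M.getD rr [] = row := by
      have hg : (M.drop rr)[0]? = M[rr + 0]? := List.getElem?_drop ..
      rw [← hdrop] at hg
      simp at hg
      simp [List.getD_eq_getElem?_getD, ← hg]
    have hdrop' : rest' = M.drop (rr + 1) := by
      rw [← List.tail_drop, ← hdrop]; rfl
    have hf2 : rest'.length < fuel' := by
      simp only [List.length_cons] at hfuel; omega
    have hpv : pvPatternValue pi = if pi % 2 = 1 then 2 else 0 := by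
      unfold pvPatternValue; rw [if_neg (by omega)]
    rw [pvLoopA]
    rcases Nat.mod_two_eq_zero_or_one pi with hp | hp
    · -- pi even: expecting 0
      rw [hp] at hpv; norm_num at hpv
      rw [if_neg (show ¬ pi % 2 = 1 by omega)]
      by_cases hc : 0 ≤ cc ∧ cc < (m' : Int) ∧ row.getD cc.toNat 0 = 0
      · rw [if_pos (by
          refine ⟨by omega, by omega, hc.1, hc.2.1, ?_⟩
          rw [hpv]; unfold pvVal; rw [Int.toNat_natCast, hrow]; exact hc.2.2)]
        rw [show ((rr : Int) + 1) = ((rr + 1 : Nat) : Int) by push_cast; ring]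
        rw [ih (rr + 1) (cc + 1) (pi + 1) fuel' hdrop' hf2 (by omega)]
        rw [if_pos (by omega)]
        rw [runG, if_pos hc]
        omega
      · rw [if_neg (by
          intro h
          refine hc ⟨h.2.2.1, h.2.2.2.1, ?_⟩
          have hv := h.2.2.2.2
          rw [hpv] at hv; unfold pvVal at hv; rw [Int.toNat_natCast, hrow] at hv; exact hv)]
        rw [runG, if_neg hc]
        simp
    · -- pi odd: expecting 2
      rw [hp] at hpv; norm_num at hpv
      rw [if_pos hp]
      by_cases hc : 0 ≤ cc ∧ cc < (m' : Int) ∧ row.getD cc.toNat 0 = 2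
      · rw [if_pos (by
          refine ⟨by omega, by omega, hc.1, hc.2.1, ?_⟩
          rw [hpv]; unfold pvVal; rw [Int.toNat_natCast, hrow]; exact hc.2.2)]
        rw [show ((rr : Int) + 1) = ((rr + 1 : Nat) : Int) by push_cast; ring]
        rw [ih (rr + 1) (cc + 1) (pi + 1) fuel' hdrop' hf2 (by omega)]
        rw [if_neg (by omega)]
        rw [runF, if_pos hc]
        omega
      · rw [if_neg (by
          intro h
          refine hc ⟨h.2.2.1, h.2.2.2.1, ?_⟩
          have hv := h.2.2.2.2
          rw [hpv] at hv; unfold pvVal at hv; rw [Int.toNat_natCast, hrow] at hv; exact hv)]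
        rw [runF, if_neg hc]
        simp

-- ===== DP table lemmas =====

def pvCoreSt (m : Nat) (rs : List (List Int)) :
    List (List Int) × List Int × List Int :=
  rs.reverse.foldl
    (fun (st : List (List Int) × List Int × List Int) row =>
      let f := pvMkRow m row st.2.2 2
      let g := pvMkRow m row st.2.1 0
      (f :: st.1, f, g))
    ([], List.replicate m 0, List.replicate m 0)

lemma core_eq_coreSt (m : Nat) (rs : List (List Int)) : pvCore m rs = (pvCoreSt m rs).1 := rfl

lemma coreSt_cons (m : Nat) (row : List Int) (rest : List (List Int)) :
    pvCoreSt m (row :: rest) =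
      (pvMkRow m row (pvCoreSt m rest).2.2 2 :: (pvCoreSt m rest).1,
       pvMkRow m row (pvCoreSt m rest).2.2 2,
       pvMkRow m row (pvCoreSt m rest).2.1 0) := by
  unfold pvCoreSt
  rw [List.reverse_cons, List.foldl_append]
  rfl

lemma mkRow_getD (m : Nat) (row nxt : List Int) (v : Int) (c : Nat) (hc : c < row.length) :
    (pvMkRow m row nxt v).getD c 0 =
      if row.getD c 0 = v then 1 + (if c + 1 < m then nxt.getD (c + 1) 0 else 0) else 0 := by
  unfold pvMkRow
  simp [List.getD_eq_getElem?_getD, List.getElem?_mapIdx,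
    List.getElem?_eq_getElem hc]

lemma mkRow_getD_out (m : Nat) (row nxt : List Int) (v : Int) (c : Nat)
    (hc : row.length ≤ c) : (pvMkRow m row nxt v).getD c 0 = 0 := by
  apply getD_out
  simpa [pvMkRow] using hc

-- entries of the three components of the DP state are runF / runG values
lemma coreSt_entries (m : Nat) (rs : List (List Int)) (h : ∀ row ∈ rs, row.length = m) :
    (∀ c : Nat, (pvCoreSt m rs).2.1.getD c 0 = (runF m rs (c : Int) : Int)) ∧
    (∀ c : Nat, (pvCoreSt m rs).2.2.getD c 0 = (runG m rs (c : Int) : Int)) ∧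
    (∀ r c : Nat, ((pvCoreSt m rs).1.getD r []).getD c 0 = (runF m (rs.drop r) (c : Int) : Int)) := by
  induction rs with
  | nil =>
    refine ⟨?_, ?_, ?_⟩
    · intro c
      rw [runF]
      simp [pvCoreSt, List.getD_eq_getElem?_getD, List.getElem?_replicate]
      split <;> simp
    · intro c
      rw [runG]
      simp [pvCoreSt, List.getD_eq_getElem?_getD, List.getElem?_replicate]
      split <;> simp
    · intro r c
      rw [List.drop_nil, runF]
      simp [pvCoreSt]
  | cons row rest ih =>
    have hrowlen : row.length = m := h row (by simp)
    obtain ⟨ihF, ihG, ihT⟩ := ih (fun r hr => h r (by simp [hr]))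
    have hF : ∀ c : Nat, (pvMkRow m row (pvCoreSt m rest).2.2 2).getD c 0 =
        (runF m (row :: rest) (c : Int) : Int) := by
      intro c
      by_cases hc : c < row.length
      · rw [mkRow_getD m row _ 2 c hc]
        by_cases hv : row.getD c 0 = 2
        · have hguard : 0 ≤ (c : Int) ∧ (c : Int) < (m : Int) ∧
              row.getD ((c : Int)).toNat 0 = 2 :=
            ⟨by omega, by rw [hrowlen] at hc; exact_mod_cast hc, by simpa using hv⟩
          rw [if_pos hv, runF, if_pos hguard]
          by_cases hcm : c + 1 < m
          · rw [if_pos hcm, ihG (c + 1)]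
            push_cast; ring
          · rw [if_neg hcm, runG_ge m rest ((c : Int) + 1) (by omega)]
            simp
        · rw [if_neg hv, runF, if_neg (fun hcon => hv (by simpa using hcon.2.2))]
          simp
      · rw [mkRow_getD_out m row _ 2 c (by omega), runF,
          if_neg (by rw [hrowlen] at hc; intro hcon; exact hc (by omega))]
        simp
    have hG : ∀ c : Nat, (pvMkRow m row (pvCoreSt m rest).2.1 0).getD c 0 =
        (runG m (row :: rest) (c : Int) : Int) := by
      intro c
      by_cases hc : c < row.length
      · rw [mkRow_getD m row _ 0 c hc]
        by_cases hv : row.getD c 0 = 0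
        · have hguard : 0 ≤ (c : Int) ∧ (c : Int) < (m : Int) ∧
              row.getD ((c : Int)).toNat 0 = 0 :=
            ⟨by omega, by rw [hrowlen] at hc; exact_mod_cast hc, by simpa using hv⟩
          rw [if_pos hv, runG, if_pos hguard]
          by_cases hcm : c + 1 < m
          · rw [if_pos hcm, ihF (c + 1)]
            push_cast; ring
          · rw [if_neg hcm, runF_ge m rest ((c : Int) + 1) (by omega)]
            simp
        · rw [if_neg hv, runG, if_neg (fun hcon => hv (by simpa using hcon.2.2))]
          simp
      · rw [mkRow_getD_out m row _ 0 c (by omega), runG,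
          if_neg (by rw [hrowlen] at hc; intro hcon; exact hc (by omega))]
        simp
    refine ⟨by rw [coreSt_cons]; exact hF, by rw [coreSt_cons]; exact hG, ?_⟩
    intro r c
    rw [coreSt_cons]
    cases r with
    | zero => simpa using hF c
    | succ r => simpa using ihT r c

-- B's guarded table lookup, as a run value
lemma tabL (m : Nat) (M' : List (List Int)) (h : ∀ row ∈ M', row.length = m)
    (nl : Nat) (hl : nl = M'.length) (rr cc : Nat) :
    (if rr + 1 < nl ∧ cc + 1 < m
       then ((pvCore m M').getD (rr + 1) []).getD (cc + 1) 0 else 0) =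
    (runF m (M'.drop (rr + 1)) ((cc : Int) + 1) : Int) := by
  have hcast : ((cc : Int) + 1) = ((cc + 1 : Nat) : Int) := by push_cast; ring
  by_cases hg : rr + 1 < nl ∧ cc + 1 < m
  · rw [if_pos hg, core_eq_coreSt, (coreSt_entries m M' h).2.2 (rr + 1) (cc + 1), hcast]
  · rw [if_neg hg]
    rcases not_and_or.mp hg with hn | hn
    · rw [List.drop_eq_nil_of_le (by omega), runF]; simp
    · rw [hcast, runF_ge m _ _ (by push_cast; omega)]; simp

lemma rows_rect (M : List (List Int)) (m' : Nat) (hpre : ∀ row ∈ M, m' ≤ row.length) :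
    ∀ row ∈ M.map (fun row => row.take m'), row.length = m' := by
  intro row hrow
  rw [List.mem_map] at hrow
  obtain ⟨a, ha, rfl⟩ := hrow
  simp [List.length_take]
  exact hpre a ha

-- direction (1,1): the loop value from a start cell holding 1
lemma pi_11 (M : List (List Int)) (m' : Nat) (r c : Nat)
    (hr : r < M.length) (hc : c < m') (h1 : pvVal M r c = 1) :
    ((pvLoopA M (M.length) (m') 1 1 (r : Int) (c : Int) 0 (M.length + 1)).2.2 : Int) =
      1 + (runF m' ((M.map (fun row => row.take m')).drop (r + 1)) ((c : Int) + 1) : Int) := by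
  rw [← loop_rows M m' 1 1]
  rw [pvLoopA, if_pos (by
    refine ⟨by omega, by omega, by omega, by omega, ?_⟩
    rw [val_map_take M m' r c (by omega) (by omega) (by omega) (by omega)]
    exact h1)]
  simp only [Nat.zero_add]
  rw [show ((r : Int) + 1) = ((r + 1 : Nat) : Int) by push_cast; ring]
  rw [loop_run (M.map (fun row => row.take m')) m' (M.length) (by simp) _ (r + 1)
    ((c : Int) + 1) 1 M.length rfl (by simp; omega) (le_refl 1)]
  rw [if_pos (by norm_num)]
  push_cast; ring

-- direction (1,-1)
lemma pi_1m1 (M : List (List Int)) (m' : Nat) (hpre : ∀ row ∈ M, m' ≤ row.length) (r c : Nat)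
    (hr : r < M.length) (hc : c < m') (h1 : pvVal M r c = 1) :
    ((pvLoopA M (M.length) (m') 1 (-1) (r : Int) (c : Int) 0 (M.length + 1)).2.2 : Int) =
      1 + (runF m' (((M.map (fun row => row.take m')).map List.reverse).drop (r + 1))
            ((m' : Int) - 1 - c + 1) : Int) := by
  have hrect := rows_rect M m' hpre
  rw [← loop_rows M m' 1 (-1)]
  rw [← loop_flipC (M.map (fun row => row.take m')) (M.length) (m') m' rfl hrect
    (by simp) 1 (-1) (M.length + 1) (r : Int) (c : Int) 0]
  rw [show (-(-1) : Int) = 1 by norm_num]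
  rw [pvLoopA, if_pos (by
    refine ⟨by omega, by omega, by omega, by omega, ?_⟩
    rw [val_map_reverse _ m' ((m' : Nat) : Int) rfl hrect (r : Int) (c : Int) (by omega)
      (by simp; omega) (by omega) (by omega)]
    rw [val_map_take M m' r c (by omega) (by omega) (by omega) (by omega)]
    exact h1)]
  simp only [Nat.zero_add]
  rw [show ((r : Int) + 1) = ((r + 1 : Nat) : Int) by push_cast; ring]
  rw [loop_run ((M.map (fun row => row.take m')).map List.reverse) m' (M.length)
    (by simp) _ (r + 1) ((m' : Int) - 1 - (c : Int) + 1) 1 M.length rfl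
    (by simp; omega) (le_refl 1)]
  rw [if_pos (by norm_num)]
  push_cast; ring

-- direction (-1,1)
lemma pi_m11 (M : List (List Int)) (m' : Nat) (r c : Nat)
    (hr : r < M.length) (hc : c < m') (h1 : pvVal M r c = 1) :
    ((pvLoopA M (M.length) (m') (-1) 1 (r : Int) (c : Int) 0 (M.length + 1)).2.2 : Int) =
      1 + (runF m' ((M.map (fun row => row.take m')).reverse.drop (M.length - 1 - r + 1))
            ((c : Int) + 1) : Int) := by
  rw [← loop_rows M m' (-1) 1]
  rw [← loop_flipR (M.map (fun row => row.take m')) (M.length) (m') (by simp) (-1) 1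
    (M.length + 1) (r : Int) (c : Int) 0]
  rw [show (-(-1) : Int) = 1 by norm_num]
  rw [pvLoopA, if_pos (by
    refine ⟨by omega, by omega, by omega, by omega, ?_⟩
    rw [val_reverse _ (M.length) (by simp) (r : Int) (c : Int) (by omega) (by omega)]
    rw [val_map_take M m' r c (by omega) (by omega) (by omega) (by omega)]
    exact h1)]
  simp only [Nat.zero_add]
  rw [show ((M.length : Nat) : Int) - 1 - (r : Int) + 1 = ((M.length - 1 - r + 1 : Nat) : Int) by
    push_cast; omega]
  rw [loop_run ((M.map (fun row => row.take m')).reverse) m' (M.length) (by simp) _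
    (M.length - 1 - r + 1) ((c : Int) + 1) 1 M.length rfl (by simp; omega) (le_refl 1)]
  rw [if_pos (by norm_num)]
  push_cast; ring

-- direction (-1,-1)
lemma pi_m1m1 (M : List (List Int)) (m' : Nat) (hpre : ∀ row ∈ M, m' ≤ row.length) (r c : Nat)
    (hr : r < M.length) (hc : c < m') (h1 : pvVal M r c = 1) :
    ((pvLoopA M (M.length) (m') (-1) (-1) (r : Int) (c : Int) 0 (M.length + 1)).2.2 : Int) =
      1 + (runF m' (((M.map (fun row => row.take m')).reverse.map List.reverse).drop
            (M.length - 1 - r + 1)) ((m' : Int) - 1 - c + 1) : Int) := by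
  have hrect := rows_rect M m' hpre
  have hrectR : ∀ row ∈ (M.map (fun row => row.take m')).reverse, row.length = m' := by
    intro row hrow
    exact hrect row (List.mem_reverse.mp hrow)
  rw [← loop_rows M m' (-1) (-1)]
  rw [← loop_flipR (M.map (fun row => row.take m')) (M.length) (m') (by simp) (-1) (-1)
    (M.length + 1) (r : Int) (c : Int) 0]
  rw [show (-(-1) : Int) = 1 by norm_num]
  rw [← loop_flipC ((M.map (fun row => row.take m')).reverse) (M.length) (m') m' rfl hrectR
    (by simp) 1 (-1) (M.length + 1) ((M.length : Int) - 1 - (r : Int)) (c : Int) 0]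
  rw [show (-(-1) : Int) = 1 by norm_num]
  rw [pvLoopA, if_pos (by
    refine ⟨by omega, by omega, by omega, by omega, ?_⟩
    rw [val_map_reverse _ m' ((m' : Nat) : Int) rfl hrectR ((M.length : Int) - 1 - (r : Int))
      (c : Int) (by omega) (by simp; omega) (by omega) (by omega)]
    rw [val_reverse _ (M.length) (by simp) (r : Int) (c : Int) (by omega) (by omega)]
    rw [val_map_take M m' r c (by omega) (by omega) (by omega) (by omega)]
    exact h1)]
  simp only [Nat.zero_add]
  rw [show ((M.length : Nat) : Int) - 1 - (r : Int) + 1 = ((M.length - 1 - r + 1 : Nat) : Int) by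
    push_cast; omega]
  rw [loop_run ((M.map (fun row => row.take m')).reverse.map List.reverse) m' (M.length)
    (by simp) _ (M.length - 1 - r + 1) ((m' : Int) - 1 - (c : Int) + 1) 1 M.length rfl
    (by simp; omega) (le_refl 1)]
  rw [if_pos (by norm_num)]
  push_cast; ring

-- ===== VERDICT =====
theorem solution_spec : Claim_equal_solution := by
  intro matrix _hdom hpre
  unfold Spec_solution solution solution_alt
  by_cases h0 : matrix.length = 0 ∨ (matrix.headD []).length = 0
  · rw [if_pos (by omega), if_pos h0]
  · rw [if_neg (by omega), if_neg h0]
    apply PySem.List.foldl_congr_mem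
    intro acc r hrmem
    apply PySem.List.foldl_congr_mem
    intro acc2 c hcmem
    have hr : r < matrix.length := List.mem_range.mp hrmem
    have hc : c < (matrix.headD []).length := List.mem_range.mp hcmem
    have hval : ((matrix.map (fun row => row.take (matrix.headD []).length)).getD r []).getD c 0 =
        pvVal matrix r c := by
      have h := val_map_take matrix ((matrix.headD []).length) r c (by omega)
        (by omega) (by omega) (by omega)
      unfold pvVal at h ⊢
      simpa using h
    by_cases hv : pvVal matrix r c = 1
    · rw [if_pos hv, if_neg (by rw [hval, hv]; simp)]
      simp only [List.foldl_cons, List.foldl_nil, reduceIte,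
        show ((-1 : Int) = 1) = False by simp, if_false]
      have hpi1 := pi_11 matrix ((matrix.headD []).length) r c hr hc hv
      have hpi2 := pi_1m1 matrix ((matrix.headD []).length) hpre r c hr hc hv
      have hpi3 := pi_m11 matrix ((matrix.headD []).length) r c hr hc hv
      have hpi4 := pi_m1m1 matrix ((matrix.headD []).length) hpre r c hr hc hv
      obtain ⟨k1, hk1, hl1⟩ := loop_shape matrix (matrix.length) ((matrix.headD []).length)
        1 1 (matrix.length + 1) r c 0
      obtain ⟨k2, hk2, hl2⟩ := loop_shape matrix (matrix.length) ((matrix.headD []).length)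
        1 (-1) (matrix.length + 1) r c 0
      obtain ⟨k3, hk3, hl3⟩ := loop_shape matrix (matrix.length) ((matrix.headD []).length)
        (-1) 1 (matrix.length + 1) r c 0
      obtain ⟨k4, hk4, hl4⟩ := loop_shape matrix (matrix.length) ((matrix.headD []).length)
        (-1) (-1) (matrix.length + 1) r c 0
      rw [hk1] at hpi1; rw [hk2] at hpi2; rw [hk3] at hpi3; rw [hk4] at hpi4
      simp only [Nat.zero_add] at hpi1 hpi2 hpi3 hpi4
      rw [hk1, hk2, hk3, hk4]
      simp only [Nat.zero_add]
      have hp1 : 0 < k1 := by omega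
      have hp2 : 0 < k2 := by omega
      have hp3 : 0 < k3 := by omega
      have hp4 : 0 < k4 := by omega
      have hb1 := hl1 hp1
      have hb2 := hl2 hp2
      have hb3 := hl3 hp3
      have hb4 := hl4 hp4
      rw [if_pos (show 0 ≤ (r : Int) + k4 * -1 - -1 ∧ (r : Int) + k4 * -1 - -1 < (matrix.length : Int) ∧
            0 ≤ (c : Int) + k4 * -1 - -1 ∧ (c : Int) + k4 * -1 - -1 < ((matrix.headD []).length : Int) by
          obtain ⟨a, b, d, e⟩ := hb4; refine ⟨by omega, by omega, by omega, by omega⟩)]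
      rw [if_pos (show 0 ≤ (r : Int) + k3 * -1 - -1 ∧ (r : Int) + k3 * -1 - -1 < (matrix.length : Int) ∧
            0 ≤ (c : Int) + k3 * 1 - 1 ∧ (c : Int) + k3 * 1 - 1 < ((matrix.headD []).length : Int) by
          obtain ⟨a, b, d, e⟩ := hb3; refine ⟨by omega, by omega, by omega, by omega⟩)]
      rw [if_pos (show 0 ≤ (r : Int) + k2 * 1 - 1 ∧ (r : Int) + k2 * 1 - 1 < (matrix.length : Int) ∧
            0 ≤ (c : Int) + k2 * -1 - -1 ∧ (c : Int) + k2 * -1 - -1 < ((matrix.headD []).length : Int) by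
          obtain ⟨a, b, d, e⟩ := hb2; refine ⟨by omega, by omega, by omega, by omega⟩)]
      rw [if_pos (show 0 ≤ (r : Int) + k1 * 1 - 1 ∧ (r : Int) + k1 * 1 - 1 < (matrix.length : Int) ∧
            0 ≤ (c : Int) + k1 * 1 - 1 ∧ (c : Int) + k1 * 1 - 1 < ((matrix.headD []).length : Int) by
          obtain ⟨a, b, d, e⟩ := hb1; refine ⟨by omega, by omega, by omega, by omega⟩)]
      have hrect := rows_rect matrix ((matrix.headD []).length) hpre
      have hrectC : ∀ row ∈ (matrix.map (fun row => row.take (matrix.headD []).length)).map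
          List.reverse, row.length = (matrix.headD []).length := by
        intro row hrow
        rw [List.mem_map] at hrow
        obtain ⟨a, ha, rfl⟩ := hrow
        rw [List.length_reverse]
        exact hrect a ha
      have hrectR : ∀ row ∈ (matrix.map (fun row => row.take (matrix.headD []).length)).reverse,
          row.length = (matrix.headD []).length := fun row hrow => hrect row (List.mem_reverse.mp hrow)
      have hrectRC : ∀ row ∈ ((matrix.map (fun row => row.take (matrix.headD []).length)).reverse).map
          List.reverse, row.length = (matrix.headD []).length := by
        intro row hrow
        rw [List.mem_map] at hrow
        obtain ⟨a, ha, rfl⟩ := hrow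
        rw [List.length_reverse]
        exact hrectR a ha
      have hB1 : (1 : Int) + (if r + 1 < matrix.length ∧ c + 1 < (matrix.headD []).length then
          ((pvCore ((matrix.headD []).length)
              (matrix.map (fun row => row.take (matrix.headD []).length))).getD (r + 1) []).getD (c + 1) 0
          else 0) = (k1 : Int) := by
        rw [tabL ((matrix.headD []).length) _ hrect (matrix.length) (by simp) r c]
        omega
      have hB2 : (1 : Int) + (if r + 1 < matrix.length ∧
            ((matrix.headD []).length - 1 - c) + 1 < (matrix.headD []).length then
          ((pvCore ((matrix.headD []).length)
              ((matrix.map (fun row => row.take (matrix.headD []).length)).map List.reverse)).getD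
              (r + 1) []).getD (((matrix.headD []).length - 1 - c) + 1) 0
          else 0) = (k2 : Int) := by
        rw [tabL ((matrix.headD []).length) _ hrectC (matrix.length) (by simp) r
          ((matrix.headD []).length - 1 - c)]
        rw [show (((matrix.headD []).length - 1 - c : Nat) : Int) + 1 =
          ((matrix.headD []).length : Int) - 1 - (c : Int) + 1 by omega]
        omega
      have hB3 : (1 : Int) + (if (matrix.length - 1 - r) + 1 < matrix.length ∧
            c + 1 < (matrix.headD []).length then
          ((pvCore ((matrix.headD []).length)
              ((matrix.map (fun row => row.take (matrix.headD []).length)).reverse)).getD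
              ((matrix.length - 1 - r) + 1) []).getD (c + 1) 0
          else 0) = (k3 : Int) := by
        rw [tabL ((matrix.headD []).length) _ hrectR (matrix.length) (by simp)
          (matrix.length - 1 - r) c]
        omega
      have hB4 : (1 : Int) + (if (matrix.length - 1 - r) + 1 < matrix.length ∧
            ((matrix.headD []).length - 1 - c) + 1 < (matrix.headD []).length then
          ((pvCore ((matrix.headD []).length)
              (((matrix.map (fun row => row.take (matrix.headD []).length)).reverse).map
                List.reverse)).getD ((matrix.length - 1 - r) + 1) []).getD
              (((matrix.headD []).length - 1 - c) + 1) 0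
          else 0) = (k4 : Int) := by
        rw [tabL ((matrix.headD []).length) _ hrectRC (matrix.length) (by simp)
          (matrix.length - 1 - r) ((matrix.headD []).length - 1 - c)]
        rw [show (((matrix.headD []).length - 1 - c : Nat) : Int) + 1 =
          ((matrix.headD []).length : Int) - 1 - (c : Int) + 1 by omega]
        omega
      rw [hB1, hB2, hB3, hB4]
      rw [show (r : Int) + k1 * 1 - 1 = (r : Int) + ((k1 : Int) - 1) * 1 by ring,
          show (c : Int) + k1 * 1 - 1 = (c : Int) + ((k1 : Int) - 1) * 1 by ring,
          show (r : Int) + k2 * 1 - 1 = (r : Int) + ((k2 : Int) - 1) * 1 by ring,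
          show (c : Int) + k2 * -1 - -1 = (c : Int) + ((k2 : Int) - 1) * -1 by ring,
          show (r : Int) + k3 * -1 - -1 = (r : Int) + ((k3 : Int) - 1) * -1 by ring,
          show (c : Int) + k3 * 1 - 1 = (c : Int) + ((k3 : Int) - 1) * 1 by ring,
          show (r : Int) + k4 * -1 - -1 = (r : Int) + ((k4 : Int) - 1) * -1 by ring,
          show (c : Int) + k4 * -1 - -1 = (c : Int) + ((k4 : Int) - 1) * -1 by ring]
    · rw [if_neg hv, if_pos (by rw [hval]; exact hv)]
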